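-- pv_equiv track=rewrite | github.com/yavuuzsameet/TEMPHI | src/relx_inp_converter.py | find_sentences_with_indexes
-- ===== SOURCE A (Python) =====
-- def find_sentences_with_indexes(processed_paper):
--     id_, text, entities = processed_paper
--     sentences = []
--
--     start_index = 0
--     for sentence in text.split('. '):
--         end_index = start_index + len(sentence)
--         sentences.append((start_index, end_index, sentence))
--         start_index = end_index + 2  # adjust for ". " delimiter
--
--     return sentences
-- ===== SOURCE B (Python) =====
-- def find_sentences_with_indexes(processed_paper):
--     id_, text, entities = processed_paper
--     sentences = []
--     rest = text
--     start = 0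
--     while True:
--         pos = rest.find('. ')
--         if pos == -1:
--             sentences.append((start, start + len(rest), rest))
--             return sentences
--         sentences.append((start, start + pos, rest[:pos]))
--         rest = rest[pos + 2:]
--         start += pos + 2
-- ===== Notes on version B (the rewrite author's own statement) =====
-- stated objective: alternative
-- what changed: Replaces the split('. ')-then-offset-arithmetic loop by a direct delimiter scan that keeps a cursor and repeatedly finds the next '. ' occurrence, slicing sentences out of the text itself.
import Mathlib
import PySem

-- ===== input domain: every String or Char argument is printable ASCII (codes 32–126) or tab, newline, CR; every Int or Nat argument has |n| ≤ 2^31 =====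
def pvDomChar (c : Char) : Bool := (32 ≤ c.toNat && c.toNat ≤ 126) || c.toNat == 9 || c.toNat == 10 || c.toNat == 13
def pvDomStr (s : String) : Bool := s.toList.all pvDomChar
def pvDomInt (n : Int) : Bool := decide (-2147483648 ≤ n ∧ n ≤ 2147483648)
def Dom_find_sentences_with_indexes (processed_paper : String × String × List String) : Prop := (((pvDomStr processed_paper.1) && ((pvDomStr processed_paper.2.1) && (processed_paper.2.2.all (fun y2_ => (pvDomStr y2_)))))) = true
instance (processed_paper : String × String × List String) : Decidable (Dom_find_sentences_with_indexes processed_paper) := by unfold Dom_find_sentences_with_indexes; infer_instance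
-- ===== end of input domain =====

-- B replaces the split('. ')-then-offset loop by a direct cursor scan for the next '. ' occurrence (alternative decomposition, same cost; return value only — neither version mutates its argument).

-- ===== PORT A =====
-- A: iterate over text.split('. '), keeping a running start index.
def find_sentences_with_indexes (processed_paper : String × String × List String) : List (Int × Int × String) :=
  (((PySem.Chars.splitOn processed_paper.2.1.toList ['.', ' ']).map String.ofList).foldl
    (fun (st : List (Int × Int × String) × Int) sentence =>
      let end_index : Int := st.2 + PySem.Str.len sentence
      (st.1 ++ [(st.2, end_index, sentence)], end_index + 2))
    ([], 0)).1

-- ===== PORT B =====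
-- B's while loop: scan the remaining suffix for the next '. '; rest[:pos] = take, rest[pos+2:] = drop (pos ≥ 0 here, so exact).
def pvAltGo (rest : List Char) (start : Int) (acc : List (Int × Int × String)) :
    List (Int × Int × String) :=
  let pos := PySem.Chars.find rest ['.', ' ']
  if h : pos = -1 then
    acc ++ [(start, start + rest.length, String.ofList rest)]
  else
    pvAltGo (rest.drop (pos.toNat + 2)) (start + pos + 2)
      (acc ++ [(start, start + pos, String.ofList (rest.take pos.toNat))])
termination_by rest.length
decreasing_by
  have hinf : ['.', ' '] <:+: rest := (PySem.Chars.find_ne_neg_one_iff rest ['.', ' ']).mp h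
  have h2 : 2 ≤ rest.length := by simpa using hinf.length_le
  simp only [List.length_drop]; omega

def find_sentences_with_indexes_alt (processed_paper : String × String × List String) :
    List (Int × Int × String) :=
  pvAltGo processed_paper.2.1.toList 0 []

-- ===== PRECONDITION & SPEC =====
def Spec_find_sentences_with_indexes (processed_paper : String × String × List String) (out : List (Int × Int × String)) : Prop := out = find_sentences_with_indexes_alt processed_paper
instance (processed_paper : String × String × List String) (out : List (Int × Int × String)) : Decidable (Spec_find_sentences_with_indexes processed_paper out) := by unfold Spec_find_sentences_with_indexes; infer_instance

-- ===== CLAIM (what is proved, stated in full; the proofs are below) =====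
def Claim_equal_find_sentences_with_indexes : Prop := ∀ (processed_paper : String × String × List String), Dom_find_sentences_with_indexes processed_paper → Spec_find_sentences_with_indexes processed_paper (find_sentences_with_indexes processed_paper)

-- ===== LEMMAS AND PROOFS =====

-- The split of s by '. ' as B's scan produces it.
def pvSpec (s : List Char) : List (List Char) :=
  let pos := PySem.Chars.find s ['.', ' ']
  if h : pos = -1 then [s]
  else s.take pos.toNat :: pvSpec (s.drop (pos.toNat + 2))
termination_by s.length
decreasing_by
  have hinf : ['.', ' '] <:+: s := (PySem.Chars.find_ne_neg_one_iff s ['.', ' ']).mp h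
  have h2 : 2 ≤ s.length := by simpa using hinf.length_le
  simp only [List.length_drop]; omega

lemma pvFindGo_eq (sub l : List Char) (k : Nat) :
    PySem.Chars.find.go sub l k =
      if PySem.Chars.find l sub = -1 then -1 else (k : Int) + PySem.Chars.find l sub := by
  induction l generalizing k with
  | nil =>
    simp only [PySem.Chars.find, PySem.Chars.find.go]
    split_ifs <;> simp_all
  | cons c t ih =>
    simp only [PySem.Chars.find, PySem.Chars.find.go]
    by_cases hp : sub.isPrefixOf (c :: t) = true
    · simp [hp]
    · simp only [hp]
      rw [ih (k + 1), ih (0 + 1)]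
      have := PySem.Chars.neg_one_le_find t sub
      split_ifs <;> push_cast <;> omega

lemma pvFind_prefix {s : List Char} (h : List.isPrefixOf ['.', ' '] s = true) :
    PySem.Chars.find s ['.', ' '] = 0 := by
  cases s with
  | nil => simp [List.isPrefixOf] at h
  | cons c t => simp [PySem.Chars.find, PySem.Chars.find.go, h]

lemma pvFind_cons {c : Char} {t : List Char} (h : ¬ List.isPrefixOf ['.', ' '] (c :: t) = true) :
    PySem.Chars.find (c :: t) ['.', ' '] =
      if PySem.Chars.find t ['.', ' '] = -1 then -1 else PySem.Chars.find t ['.', ' '] + 1 := by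
  have h1 : PySem.Chars.find (c :: t) ['.', ' '] = PySem.Chars.find.go ['.', ' '] t 1 := by
    simp [PySem.Chars.find, PySem.Chars.find.go, h]
  rw [h1, pvFindGo_eq]
  split_ifs <;> omega

lemma pvFind_nonneg_le {s : List Char} (h : ¬ PySem.Chars.find s ['.', ' '] = -1) :
    (PySem.Chars.find s ['.', ' ']).toNat + 2 ≤ s.length ∧ 0 ≤ PySem.Chars.find s ['.', ' '] := by
  have h0 : 0 ≤ PySem.Chars.find s ['.', ' '] := by
    have := PySem.Chars.neg_one_le_find s ['.', ' ']
    omega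
  have hpre := (PySem.Chars.find_spec h0).1
  have := hpre.length_le
  simp only [List.length_drop, List.length_cons, List.length_nil] at this
  have hle := PySem.Chars.find_le_length s ['.', ' ']
  exact ⟨by omega, h0⟩

lemma pvSpec_ne_nil (s : List Char) : pvSpec s ≠ [] := by
  rw [pvSpec]
  split_ifs <;> simp

lemma pvSpec_cons {c : Char} {t : List Char} (h : ¬ List.isPrefixOf ['.', ' '] (c :: t) = true) :
    pvSpec (c :: t) = List.modifyHead (c :: ·) (pvSpec t) := by
  rcases eq_or_ne (PySem.Chars.find t ['.', ' ']) (-1) with ht | ht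
  · have h1 : pvSpec t = [t] := by rw [pvSpec]; simp [ht]
    have h2 : PySem.Chars.find (c :: t) ['.', ' '] = -1 := by rw [pvFind_cons h]; simp [ht]
    rw [pvSpec]
    simp [h2, h1, List.modifyHead]
  · have hb := pvFind_nonneg_le ht
    have h2 : PySem.Chars.find (c :: t) ['.', ' '] = PySem.Chars.find t ['.', ' '] + 1 := by
      rw [pvFind_cons h]; simp [ht]
    have hne : ¬ (PySem.Chars.find t ['.', ' '] + 1 = -1) := by omega
    have h1 : pvSpec t
        = t.take (PySem.Chars.find t ['.', ' ']).toNat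
          :: pvSpec (t.drop ((PySem.Chars.find t ['.', ' ']).toNat + 2)) := by
      rw [pvSpec]; simp [ht]
    rw [h1]
    conv_lhs => rw [pvSpec]
    have htn : (PySem.Chars.find t ['.', ' '] + 1).toNat
        = (PySem.Chars.find t ['.', ' ']).toNat + 1 := by omega
    have hdr : (PySem.Chars.find t ['.', ' ']).toNat + 1 + 2
        = ((PySem.Chars.find t ['.', ' ']).toNat + 2) + 1 := by omega
    simp [h2, hne, htn, hdr, List.modifyHead]

lemma pvSplitGo_eq (fuel : Nat) : ∀ (s cur : List Char) (acc : List (List Char)),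
    s.length < fuel →
    PySem.Chars.splitOn.go ['.', ' '] fuel s cur acc =
      acc.reverse ++ List.modifyHead (cur.reverse ++ ·) (pvSpec s) := by
  induction fuel with
  | zero => intro s cur acc h; omega
  | succ f ih =>
    intro s cur acc h
    cases s with
    | nil =>
      rw [pvSpec]
      simp [PySem.Chars.splitOn.go, PySem.Chars.find, PySem.Chars.find.go, List.modifyHead]
    | cons c t =>
      by_cases hp : List.isPrefixOf ['.', ' '] (c :: t) = true
      · cases t with
        | nil => simp [List.isPrefixOf] at hp
        | cons d u =>
        simp [List.isPrefixOf] at hp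
        obtain ⟨h1, h3⟩ := hp
        subst h1; subst h3
        have hf : PySem.Chars.find ('.' :: ' ' :: u) ['.', ' '] = 0 :=
          pvFind_prefix (by simp [List.isPrefixOf])
        have hspec : pvSpec ('.' :: ' ' :: u) = [] :: pvSpec u := by
          rw [pvSpec]; simp [hf]
        have hstep : PySem.Chars.splitOn.go ['.', ' '] (f + 1) ('.' :: ' ' :: u) cur acc
            = PySem.Chars.splitOn.go ['.', ' '] f u [] (cur.reverse :: acc) := by
          simp [PySem.Chars.splitOn.go, List.isPrefixOf]
        rw [hstep, ih u [] (cur.reverse :: acc) (by simp at h; omega), hspec]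
        rcases List.exists_cons_of_ne_nil (pvSpec_ne_nil u) with ⟨hd, tl, hh⟩
        simp [hh, List.modifyHead]
      · rw [pvSpec_cons hp]
        have hstep : PySem.Chars.splitOn.go ['.', ' '] (f + 1) (c :: t) cur acc
            = PySem.Chars.splitOn.go ['.', ' '] f t (c :: cur) acc := by
          simp [PySem.Chars.splitOn.go, hp]
        rw [hstep, ih t (c :: cur) acc (by simp at h; omega)]
        rcases List.exists_cons_of_ne_nil (pvSpec_ne_nil t) with ⟨hd, tl, hh⟩
        simp [hh, List.modifyHead]

lemma pvSplitOn_eq_spec (s : List Char) :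
    PySem.Chars.splitOn s ['.', ' '] = pvSpec s := by
  have h0 : PySem.Chars.splitOn s ['.', ' ']
      = PySem.Chars.splitOn.go ['.', ' '] (s.length + 1) s [] [] := rfl
  rw [h0, pvSplitGo_eq (s.length + 1) s [] [] (by omega)]
  rcases List.exists_cons_of_ne_nil (pvSpec_ne_nil s) with ⟨hd, tl, hh⟩
  simp [hh, List.modifyHead]

lemma pvMain (s : List Char) : ∀ (start : Int) (acc : List (Int × Int × String)),
    (((pvSpec s).map String.ofList).foldl
      (fun (st : List (Int × Int × String) × Int) sentence =>
        let end_index : Int := st.2 + PySem.Str.len sentence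
        (st.1 ++ [(st.2, end_index, sentence)], end_index + 2))
      (acc, start)).1 = pvAltGo s start acc := by
  intro start acc
  by_cases hf : PySem.Chars.find s ['.', ' '] = -1
  · rw [pvSpec, pvAltGo]
    simp [hf, PySem.Str.len]
  · have hb := pvFind_nonneg_le hf
    have htk : (s.take (PySem.Chars.find s ['.', ' ']).toNat).length
        = (PySem.Chars.find s ['.', ' ']).toNat := by
      simp; omega
    rw [pvSpec, pvAltGo]
    simp only [hf, dif_neg, not_false_iff, List.map_cons, List.foldl_cons]
    rw [pvMain (s.drop ((PySem.Chars.find s ['.', ' ']).toNat + 2))]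
    have hmax : max (PySem.Chars.find s ['.', ' ']) 0 = PySem.Chars.find s ['.', ' '] := by
      omega
    simp [PySem.Str.len, htk, hmax]
termination_by s.length
decreasing_by
  have hinf : ['.', ' '] <:+: s := (PySem.Chars.find_ne_neg_one_iff s ['.', ' ']).mp hf
  have h2 : 2 ≤ s.length := by simpa using hinf.length_le
  simp only [List.length_drop]; omega



-- ===== VERDICT (by name: the statement is the Claim_ definition above) =====
theorem find_sentences_with_indexes_spec : Claim_equal_find_sentences_with_indexes := by
  intro pp _
  unfold Spec_find_sentences_with_indexes
  unfold find_sentences_with_indexes find_sentences_with_indexes_alt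
  rw [pvSplitOn_eq_spec]
  exact pvMain pp.2.1.toList 0 []
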